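-- pv_equiv track=rewrite | github.com/christoph2/asamint | asamint/cdf/exporter/cdf_exporter.py | _format_tag
-- ===== SOURCE A (Python) =====
-- def _format_tag(tag):
--     # Specific overrides for tags that shouldn't be just upper-cased
--     overrides = {
--         "ShortName": "SHORT-NAME",
--         "LongName": "LONG-NAME",
--         "ProjectData": "PROJECT-DATA",
--         "AdminData": "ADMIN-DATA",
--         "GeneralRequirements": "GENERAL-REQUIREMENTS",
--         "SwSystems": "SW-SYSTEMS",
--         "SwSystem": "SW-SYSTEM",
--         "SwMcCommunicationSpec": "SW-MC-COMMUNICATION-SPEC",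
--         "SwGlossary": "SW-GLOSSARY",
--         "SpecialData": "SPECIAL-DATA",
--         "MsrProcessingLog": "MSR-PROCESSING-LOG",
--         "MatchingDcis": "MATCHING-DCIS",
--         "SwInstanceSpec": "SW-INSTANCE-SPEC",
--         "SwInstanceTree": "SW-INSTANCE-TREE",
--         "SwInstance": "SW-INSTANCE",
--         "SwInstanceTreeOrigin": "SW-INSTANCE-TREE-ORIGIN",
--         "SymbolicFile": "SYMBOLIC-FILE",
--         "DataFile": "DATA-FILE",
--         "DisplayName": "DISPLAY-NAME",
--         "SwValueCont": "SW-VALUE-CONT",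
--         "UnitDisplayName": "UNIT-DISPLAY-NAME",
--         "SwCsCollections": "SW-CS-COLLECTIONS",
--         "SwCsCollection": "SW-CS-COLLECTION",
--         "SwInstancePropsVariants": "SW-INSTANCE-PROPS-VARIANTS",
--         "SwInstancePropsVariant": "SW-INSTANCE-PROPS-VARIANT",
--         "SwAxisConts": "SW-AXIS-CONTS",
--         "SwAxisCont": "SW-AXIS-CONT",
--     }
--     if tag in overrides:
--         return overrides[tag]
--
--     # Fallback to a heuristic: add hyphens before capital letters and uppercase
--     formatted = ""
--     for i, char in enumerate(tag):
--         if i > 0 and char.isupper():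
--             formatted += "-"
--         formatted += char
--     return formatted.upper()
-- ===== SOURCE B (Python) =====
-- def _format_tag(tag):
--     pieces = ["-" + ch if i and ch.isupper() else ch for i, ch in enumerate(tag)]
--     return "".join(pieces).upper()
-- ===== Notes on version B (the rewrite author's own statement) =====
-- stated objective: simpler
-- what changed: B drops the 27-entry override table and its membership branch (every override value equals the heuristic applied to its key) and builds the result as one comprehension joined and uppercased, instead of A's dict lookup plus a string accumulated by conditional concatenation.
import Mathlib
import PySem

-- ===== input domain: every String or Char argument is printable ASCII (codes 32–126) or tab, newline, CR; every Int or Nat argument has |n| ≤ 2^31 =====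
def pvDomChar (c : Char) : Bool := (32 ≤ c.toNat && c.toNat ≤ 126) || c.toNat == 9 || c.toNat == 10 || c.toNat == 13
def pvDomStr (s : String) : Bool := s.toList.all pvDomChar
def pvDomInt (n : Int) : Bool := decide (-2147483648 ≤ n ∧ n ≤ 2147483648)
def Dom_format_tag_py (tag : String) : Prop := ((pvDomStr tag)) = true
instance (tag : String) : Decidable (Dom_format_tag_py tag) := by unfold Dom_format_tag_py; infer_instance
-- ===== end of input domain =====

-- B replaces A's 27-entry override table and membership branch (each override value equals the
-- hyphenation heuristic applied to its key) by the heuristic alone, written as a comprehension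
-- joined and uppercased — simpler, same result.

-- ===== PORT A =====
-- A keeps a literal override table and falls back to the hyphenation loop.
def formatTagOverrides : PySem.Dict String String := PySem.Dict.ofList [
  ("ShortName", "SHORT-NAME"),
  ("LongName", "LONG-NAME"),
  ("ProjectData", "PROJECT-DATA"),
  ("AdminData", "ADMIN-DATA"),
  ("GeneralRequirements", "GENERAL-REQUIREMENTS"),
  ("SwSystems", "SW-SYSTEMS"),
  ("SwSystem", "SW-SYSTEM"),
  ("SwMcCommunicationSpec", "SW-MC-COMMUNICATION-SPEC"),
  ("SwGlossary", "SW-GLOSSARY"),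
  ("SpecialData", "SPECIAL-DATA"),
  ("MsrProcessingLog", "MSR-PROCESSING-LOG"),
  ("MatchingDcis", "MATCHING-DCIS"),
  ("SwInstanceSpec", "SW-INSTANCE-SPEC"),
  ("SwInstanceTree", "SW-INSTANCE-TREE"),
  ("SwInstance", "SW-INSTANCE"),
  ("SwInstanceTreeOrigin", "SW-INSTANCE-TREE-ORIGIN"),
  ("SymbolicFile", "SYMBOLIC-FILE"),
  ("DataFile", "DATA-FILE"),
  ("DisplayName", "DISPLAY-NAME"),
  ("SwValueCont", "SW-VALUE-CONT"),
  ("UnitDisplayName", "UNIT-DISPLAY-NAME"),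
  ("SwCsCollections", "SW-CS-COLLECTIONS"),
  ("SwCsCollection", "SW-CS-COLLECTION"),
  ("SwInstancePropsVariants", "SW-INSTANCE-PROPS-VARIANTS"),
  ("SwInstancePropsVariant", "SW-INSTANCE-PROPS-VARIANT"),
  ("SwAxisConts", "SW-AXIS-CONTS"),
  ("SwAxisCont", "SW-AXIS-CONT")]

def format_tag_py (tag : String) : String :=
  match formatTagOverrides.get? tag with
  | some v => v
  | none =>
    -- formatted accumulated as List Char (Python str concat), exact on the ASCII domain
    let formatted : List Char :=
      (PySem.List.enumerate tag.toList).foldl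
        (fun acc p =>
          (if p.1 > 0 && PySem.Chars.isupper p.2 then acc ++ ['-'] else acc) ++ [p.2]) []
    String.ofList (PySem.Chars.upper formatted)


-- ===== PORT B =====
-- B: one comprehension of pieces, joined with '', then uppercased (no table, no branch on it).
def format_tag_py_alt (tag : String) : String :=
  let pieces : List (List Char) :=
    (PySem.List.enumerate tag.toList).map
      (fun p => if p.1 != 0 && PySem.Chars.isupper p.2 then '-' :: [p.2] else [p.2])
  String.ofList (PySem.Chars.upper (PySem.Chars.join [] pieces))


-- ===== PRECONDITION & SPEC =====
def Spec_format_tag_py (tag : String) (out : String) : Prop := out = format_tag_py_alt tag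
instance (tag : String) (out : String) : Decidable (Spec_format_tag_py tag out) := by unfold Spec_format_tag_py; infer_instance

-- ===== CLAIM (what is proved, stated in full; the proofs are below) =====
def Claim_equal_format_tag_py : Prop := ∀ (tag : String), Dom_format_tag_py tag → Spec_format_tag_py tag (format_tag_py tag)

-- ===== LEMMAS AND PROOFS =====

lemma join_nil_map (g : Int × Char → List Char) (l : List (Int × Char)) :
    PySem.Chars.join [] (l.map g) = l.flatMap g := by
  induction l with
  | nil => rfl
  | cons a t ih =>
    cases t with
    | nil => simp [PySem.Chars.join, List.intercalate]
    | cons b t' =>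
      simp only [List.map_cons] at ih ⊢
      rw [PySem.Chars.join_cons_cons]
      simp [ih]

lemma fold_eq_flatMap (l : List (Int × Char)) (hl : ∀ p ∈ l, 0 ≤ p.1) (acc : List Char) :
    l.foldl (fun acc p =>
        (if p.1 > 0 && PySem.Chars.isupper p.2 then acc ++ ['-'] else acc) ++ [p.2]) acc
      = acc ++ l.flatMap (fun p =>
          if p.1 != 0 && PySem.Chars.isupper p.2 then '-' :: [p.2] else [p.2]) := by
  induction l generalizing acc with
  | nil => simp
  | cons hd tl ih =>
    have h0 : 0 ≤ hd.1 := hl hd (by simp)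
    have htl : ∀ p ∈ tl, 0 ≤ p.1 := fun p hp => hl p (by simp [hp])
    have hc : (decide (hd.1 > 0)) = (hd.1 != 0) := by
      rcases lt_or_eq_of_le h0 with h | h
      · simp [h]; omega
      · simp [← h]
    simp only [List.foldl_cons, List.flatMap_cons, ih htl, hc]
    by_cases h : (hd.1 != 0 && PySem.Chars.isupper hd.2) = true <;> simp [h]

lemma overrides_agree (tag v : String) (h : formatTagOverrides.get? tag = some v) :
    v = format_tag_py_alt tag := by
  have hm : (tag, v) ∈ formatTagOverrides.items :=
    PySem.Dict.mem_items_of_get?_eq_some formatTagOverrides h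
  have hall : ∀ p ∈ formatTagOverrides.items, p.2 = format_tag_py_alt p.1 := by decide
  exact hall _ hm

-- ===== VERDICT (by name: the statement is the Claim_ definition above) =====
theorem format_tag_py_spec : Claim_equal_format_tag_py := by
  intro tag _
  unfold Spec_format_tag_py format_tag_py
  cases h : formatTagOverrides.get? tag with
  | some v => exact overrides_agree tag v h
  | none =>
    have hnn : ∀ p ∈ PySem.List.enumerate tag.toList, 0 ≤ p.1 := by
      intro p hp
      rcases (PySem.List.mem_enumerate_iff _ _ _).1 hp with ⟨k, hk, rfl⟩
      simp
    rw [fold_eq_flatMap _ hnn]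
    simp [format_tag_py_alt, join_nil_map]
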